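-- pv_equiv track=rewrite | github.com/j1984001-max/taifex-report-dashboard | server.py | classify_important_date
-- ===== SOURCE A (Python) =====
-- from typing import Any
--
-- def classify_important_date(item: dict[str, Any]) -> tuple[int, str]:
--     priority = int(item.get("priority") or 0)
--     text = " ".join(
--         str(item.get(key) or "")
--         for key in ("category", "title", "sourceTitle", "note", "status")
--     ).lower()
--     high_keywords = (
--         "非農",
--         "fomc",
--         "利率決議",
--         "cpi",
--         "ppi",
--         "結算",
--         "法說",
--         "fed",
--         "ecb",
--         "boe",
--         "就業報告",
--     )
--     medium_keywords = (
--         "演說",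
--         "談話",
--         "貿易數據",
--         "消費者信心",
--         "零售銷售",
--         "pmi",
--         "gdp",
--         "失業率",
--         "初請",
--     )
--     if priority >= 3 or any(keyword in text for keyword in high_keywords):
--         return 3, "高"
--     if priority >= 2 or any(keyword in text for keyword in medium_keywords):
--         return 2, "中"
--     return 1, "低"
-- ===== SOURCE B (Python) =====
-- from typing import Any
--
-- _KEYWORD_TIER = {
--     "非農": 3, "fomc": 3, "利率決議": 3, "cpi": 3, "ppi": 3, "結算": 3,
--     "法說": 3, "fed": 3, "ecb": 3, "boe": 3, "就業報告": 3,
--     "演說": 2, "談話": 2, "貿易數據": 2, "消費者信心": 2, "零售銷售": 2,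
--     "pmi": 2, "gdp": 2, "失業率": 2, "初請": 2,
-- }
-- _LABELS = ("低", "中", "高")
--
-- def classify_important_date(item: dict[str, Any]) -> tuple[int, str]:
--     priority = int(item.get("priority") or 0)
--     text = " ".join(
--         str(item.get(key) or "")
--         for key in ("category", "title", "sourceTitle", "note", "status")
--     ).lower()
--     level = min(max(priority, 1), 3)
--     for keyword, tier in _KEYWORD_TIER.items():
--         if tier > level and keyword in text:
--             level = tier
--     return level, _LABELS[level - 1]
-- ===== Notes on version B (the rewrite author's own statement) =====
-- stated objective: alternative
-- what changed: Replaces A's short-circuit if/or cascade over two keyword tuples by one merged keyword-to-tier dict folded with a level accumulator seeded by the clamped priority, and a label tuple indexed by level instead of branch-selected literals.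
import Mathlib
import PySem

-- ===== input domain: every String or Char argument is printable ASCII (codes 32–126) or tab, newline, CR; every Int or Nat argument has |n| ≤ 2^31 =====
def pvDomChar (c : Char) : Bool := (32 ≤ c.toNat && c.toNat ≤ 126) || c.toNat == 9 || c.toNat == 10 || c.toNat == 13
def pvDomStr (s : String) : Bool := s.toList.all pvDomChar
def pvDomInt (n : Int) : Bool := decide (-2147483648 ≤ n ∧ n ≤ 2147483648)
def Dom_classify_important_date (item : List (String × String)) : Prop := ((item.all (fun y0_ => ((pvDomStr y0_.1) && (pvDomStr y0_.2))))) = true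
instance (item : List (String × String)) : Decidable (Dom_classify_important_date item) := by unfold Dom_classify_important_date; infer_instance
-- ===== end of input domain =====

-- B replaces A's short-circuit if/or cascade over two keyword tuples by one merged
-- keyword→tier dict folded with a level accumulator seeded by the clamped priority,
-- plus a label tuple indexed by the level; equality of return values proved on Pre_.

-- Shared line of both Pythons: priority = int(item.get("priority") or 0)
-- (total form; Pre_ guarantees the .getD 0 branch is only taken where int() succeeds)
def pvPriority (item : List (String × String)) : Int :=
  match (PySem.Dict.mk item).get? "priority" with
  | none => 0
  | some s => if s = "" then 0 else (PySem.Int.ofStr? s).getD 0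

-- Shared line: text = " ".join(str(item.get(k) or "") for k in (...)).lower()
def pvText (item : List (String × String)) : List Char :=
  PySem.Chars.lower (PySem.Chars.join [' ']
    ((["category", "title", "sourceTitle", "note", "status"]).map
      (fun k => (((PySem.Dict.mk item).get? k).getD "").toList)))

-- ===== PORT A =====
def pvHighKeywords : List String :=
  ["非農", "fomc", "利率決議", "cpi", "ppi", "結算", "法說", "fed", "ecb", "boe", "就業報告"]

def pvMediumKeywords : List String :=
  ["演說", "談話", "貿易數據", "消費者信心", "零售銷售", "pmi", "gdp", "失業率", "初請"]

-- any(keyword in text for keyword in kws)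
def pvAnyIn (kws : List String) (text : List Char) : Bool :=
  kws.any (fun kw => PySem.Chars.isIn kw.toList text)

def classify_important_date (item : List (String × String)) : Int × String :=
  let priority := pvPriority item
  let text := pvText item
  if priority ≥ 3 || pvAnyIn pvHighKeywords text then (3, "高")
  else if priority ≥ 2 || pvAnyIn pvMediumKeywords text then (2, "中")
  else (1, "低")

-- ===== PORT B =====
-- _KEYWORD_TIER = {…}: one merged keyword→tier dict (association list, insertion order)
def pvKeywordTier : List (String × Int) :=
  [("非農", 3), ("fomc", 3), ("利率決議", 3), ("cpi", 3), ("ppi", 3), ("結算", 3),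
   ("法說", 3), ("fed", 3), ("ecb", 3), ("boe", 3), ("就業報告", 3),
   ("演說", 2), ("談話", 2), ("貿易數據", 2), ("消費者信心", 2), ("零售銷售", 2),
   ("pmi", 2), ("gdp", 2), ("失業率", 2), ("初請", 2)]

def pvLabels : List String := ["低", "中", "高"]

-- the loop body: if tier > level and keyword in text: level = tier
def pvBump (text : List Char) (lv : Int) (p : String × Int) : Int :=
  if p.2 > lv && PySem.Chars.isIn p.1.toList text then p.2 else lv

def classify_important_date_alt (item : List (String × String)) : Int × String :=
  let priority := pvPriority item
  let text := pvText item
  let level0 : Int := min (max priority 1) 3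
  let level := pvKeywordTier.foldl (pvBump text) level0
  (level, (PySem.List.pyGet? pvLabels (level - 1)).getD "")

-- ===== PRECONDITION & SPEC =====
-- Pre_ excludes exactly the inputs where int(item["priority"]) raises ValueError
-- (a non-empty "priority" value that is not an int literal); both A and B raise there.
def Pre_classify_important_date (item : List (String × String)) : Prop :=
  (((PySem.Dict.mk item).get? "priority").all
    (fun s => s == "" || (PySem.Int.ofStr? s).isSome)) = true
instance (item : List (String × String)) : Decidable (Pre_classify_important_date item) := by unfold Pre_classify_important_date; infer_instance

def pvWitness_classify_important_date : (List (String × String)) :=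
  [("priority", " 2 "), ("title", "FOMC day")]

def Spec_classify_important_date (item : List (String × String)) (out : Int × String) : Prop := out = classify_important_date_alt item
instance (item : List (String × String)) (out : Int × String) : Decidable (Spec_classify_important_date item out) := by unfold Spec_classify_important_date; infer_instance

-- ===== CLAIM (what is proved, stated in full; the proofs are below) =====
def Claim_equal_classify_important_date : Prop := ∀ (item : List (String × String)), Dom_classify_important_date item → Pre_classify_important_date item → Spec_classify_important_date item (classify_important_date item)

-- ===== LEMMAS AND PROOFS =====
-- folding a constant-tier segment of the table either lifts the level to that tier
-- (when some keyword of the segment occurs in text) or leaves it unchanged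
theorem foldl_bump_const (text : List Char) (t : Int) (kws : List String) (lv : Int) :
    (kws.map (fun k => (k, t))).foldl (pvBump text) lv =
      if t > lv ∧ pvAnyIn kws text = true then t else lv := by
  induction kws generalizing lv with
  | nil => simp [pvAnyIn]
  | cons k ks ih =>
    simp only [List.map, List.foldl, pvAnyIn, List.any_cons] at *
    by_cases hk : PySem.Chars.isIn k.toList text = true
    · by_cases hlt : t > lv
      · rw [show pvBump text lv (k, t) = t by simp [pvBump, hk, hlt]]
        rw [ih]
        simp [hk, hlt]
      · rw [show pvBump text lv (k, t) = lv by simp [pvBump]; omega]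
        rw [ih]
        simp [hlt]
    · rw [show pvBump text lv (k, t) = lv by simp [pvBump, hk]]
      rw [ih]
      simp [hk]

theorem table_split : pvKeywordTier =
    pvHighKeywords.map (fun k => (k, (3 : Int))) ++ pvMediumKeywords.map (fun k => (k, (2 : Int))) := by
  rfl

theorem classify_important_date_eq_alt (item : List (String × String)) :
    classify_important_date item = classify_important_date_alt item := by
  unfold classify_important_date classify_important_date_alt
  simp only [table_split, List.foldl_append, foldl_bump_const]
  have hlv : min (max (pvPriority item) 1) 3 =
      if pvPriority item ≥ 3 then 3 else if pvPriority item ≥ 2 then 2 else 1 := by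
    simp only [min_def, max_def]; split_ifs <;> omega
  simp only [hlv]
  by_cases h3 : pvPriority item ≥ 3 <;> by_cases h2 : pvPriority item ≥ 2 <;>
    cases hH : pvAnyIn pvHighKeywords (pvText item) <;>
      cases hM : pvAnyIn pvMediumKeywords (pvText item) <;>
        first
        | (exfalso; omega)
        | (simp only [h3, h2, decide_true, decide_false, Bool.or_true, Bool.or_false,
            Bool.false_eq_true, and_false, and_true, if_pos, if_neg, not_false_eq_true,
            gt_iff_lt];
           norm_num;
           decide)

-- ===== VERDICT (by name: the statement is the Claim_ definition above) =====
theorem classify_important_date_spec : Claim_equal_classify_important_date := by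
  intro item _ _
  exact classify_important_date_eq_alt item
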